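-- pv_equiv track=rewrite | github.com/SciQLop/SciQLop | SciQLop/components/command_palette/backend/fuzzy.py | fuzzy_match
-- ===== SOURCE A (Python) =====
-- _BOUNDARY_CHARS = frozenset(" _/-.")
--
-- def _is_word_boundary(text: str, i: int) -> bool:
--     if i == 0:
--         return True
--     prev = text[i - 1]
--     curr = text[i]
--     return prev in _BOUNDARY_CHARS or (prev.islower() and curr.isupper())
--
-- def fuzzy_match(query: str, text: str) -> tuple[int, list[int]]:
--     if not query:
--         return 1, []
--     lower_query = query.lower()
--     lower_text = text.lower()
--     # Fast rejection: check all query chars exist in text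
--     check = 0
--     for ch in lower_query:
--         found = lower_text.find(ch, check)
--         if found == -1:
--             return 0, []
--         check = found + 1
--     positions: list[int] = []
--     score = 0
--     qi = 0
--     prev_match_idx = -2
--     for ti in range(len(lower_text)):
--         if qi < len(lower_query) and lower_text[ti] == lower_query[qi]:
--             positions.append(ti)
--             score += 1
--             if _is_word_boundary(lower_text, ti):
--                 score += 5
--             if ti == prev_match_idx + 1:
--                 score += 3
--             if ti == qi:
--                 score += 2
--             prev_match_idx = ti
--             qi += 1
--     if qi < len(lower_query):
--         return 0, []
--     if len(positions) == len(lower_text):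
--         score += 10
--     return score, positions
-- ===== SOURCE B (Python) =====
-- _BOUNDARY_CHARS = frozenset(" _/-.")
--
--
-- def _is_word_boundary(text: str, i: int) -> bool:
--     if i == 0:
--         return True
--     prev = text[i - 1]
--     curr = text[i]
--     return prev in _BOUNDARY_CHARS or (prev.islower() and curr.isupper())
--
--
-- def fuzzy_match(query: str, text: str) -> tuple[int, list[int]]:
--     if not query:
--         return 1, []
--     lower_query = query.lower()
--     lower_text = text.lower()
--     # One pass: collect the greedy match positions with repeated find().
--     positions: list[int] = []
--     start = 0
--     for ch in lower_query:
--         found = lower_text.find(ch, start)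
--         if found == -1:
--             return 0, []
--         positions.append(found)
--         start = found + 1
--     # Second pass: score the collected positions.
--     score = 0
--     for j, p in enumerate(positions):
--         score += 1
--         if _is_word_boundary(lower_text, p):
--             score += 5
--         if j > 0 and p == positions[j - 1] + 1:
--             score += 3
--         if p == j:
--             score += 2
--     if len(positions) == len(lower_text):
--         score += 10
--     return score, positions
-- ===== Notes on version B (the rewrite author's own statement) =====
-- stated objective: alternative
-- what changed: B drops A's full character-by-character scan of the text: it collects the greedy match positions directly with repeated find() in one pass and then scores the short positions list in a second pass (consecutive bonus read from positions[j-1] instead of threaded loop state).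
import Mathlib
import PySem

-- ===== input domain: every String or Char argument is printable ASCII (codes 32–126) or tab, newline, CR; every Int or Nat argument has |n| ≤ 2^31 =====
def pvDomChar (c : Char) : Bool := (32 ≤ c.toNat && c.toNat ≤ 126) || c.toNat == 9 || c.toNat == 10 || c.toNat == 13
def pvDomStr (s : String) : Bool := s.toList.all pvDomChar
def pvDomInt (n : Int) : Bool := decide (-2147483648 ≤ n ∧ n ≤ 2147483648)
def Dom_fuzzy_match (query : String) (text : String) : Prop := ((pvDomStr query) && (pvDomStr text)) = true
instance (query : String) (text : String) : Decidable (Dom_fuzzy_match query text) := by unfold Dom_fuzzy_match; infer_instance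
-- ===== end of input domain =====

-- B replaces A's full second scan of the text by collecting the greedy match positions with
-- repeated find() in one pass and scoring the (short) positions list in a second pass;
-- same return value on every input (alternative decomposition, not claimed faster).

-- ===== PORT A =====
def pvBoundaryChars : List Char := [' ', '_', '/', '-', '.']

def pvIsWordBoundary (t : List Char) (i : Int) : Bool :=
  if i = 0 then true
  else
    let prev := PySem.List.pyGetD t (i - 1) 'a'
    let curr := PySem.List.pyGetD t i 'a'
    pvBoundaryChars.contains prev || (PySem.Chars.islower prev && PySem.Chars.isupper curr)

def pvRejectA (lt : List Char) : List Char → Int → Bool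
  | [], _ => true
  | ch :: rest, check =>
    let found := PySem.Chars.findFrom lt [ch] check
    if found = -1 then false else pvRejectA lt rest (found + 1)

-- body of A's 'for ti in range(len(lower_text))' loop; state = (positions, score, qi, prev_match_idx)
def pvScanStep (lt lq : List Char) (st : List Int × Int × Int × Int) (ti : Int) :
    List Int × Int × Int × Int :=
  let (positions, score, qi, prev) := st
  if qi < (lq.length : Int) ∧ PySem.List.pyGetD lt ti 'a' = PySem.List.pyGetD lq qi 'a' then
    let positions := positions ++ [ti]
    let score := score + 1
    let score := if pvIsWordBoundary lt ti then score + 5 else score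
    let score := if ti = prev + 1 then score + 3 else score
    let score := if ti = qi then score + 2 else score
    (positions, score, qi + 1, ti)
  else st

def fuzzy_match (query : String) (text : String) : Int × List Int :=
  if query = "" then (1, [])
  else
    let lq := PySem.Chars.lower query.toList
    let lt := PySem.Chars.lower text.toList
    if pvRejectA lt lq 0 = false then (0, [])
    else
      match (PySem.List.pyRange 0 (lt.length : Int)).foldl (pvScanStep lt lq) ([], 0, 0, -2) with
      | (positions, score, qi, _) =>
        if qi < (lq.length : Int) then (0, [])
        else if positions.length = lt.length then (score + 10, positions)
        else (score, positions)

-- ===== PORT B =====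
def pvFindPositionsB (lt : List Char) : List Char → Int → List Int → Option (List Int)
  | [], _, positions => some positions
  | ch :: rest, start, positions =>
    let found := PySem.Chars.findFrom lt [ch] start
    if found = -1 then none
    else pvFindPositionsB lt rest (found + 1) (positions ++ [found])

-- body of B's 'for j, p in enumerate(positions)' scoring loop (zipIdx pairs are (p, j))
def pvScoreStep (lt : List Char) (positions : List Int) (score : Int) (jp : Int × Int) : Int :=
  let (j, p) := jp
  let score := score + 1
  let score := if pvIsWordBoundary lt p then score + 5 else score
  let score := if 0 < j ∧ p = PySem.List.pyGetD positions (j - 1) 0 + 1 then score + 3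
               else score
  if p = j then score + 2 else score

def fuzzy_match_alt (query : String) (text : String) : Int × List Int :=
  if query = "" then (1, [])
  else
    let lq := PySem.Chars.lower query.toList
    let lt := PySem.Chars.lower text.toList
    match pvFindPositionsB lt lq 0 [] with
    | none => (0, [])
    | some positions =>
      let score := (PySem.List.enumerate positions).foldl (pvScoreStep lt positions) 0
      if positions.length = lt.length then (score + 10, positions) else (score, positions)

-- ===== PRECONDITION & SPEC =====
def Spec_fuzzy_match (query : String) (text : String) (out : Int × List Int) : Prop := out = fuzzy_match_alt query text
instance (query : String) (text : String) (out : Int × List Int) : Decidable (Spec_fuzzy_match query text out) := by unfold Spec_fuzzy_match; infer_instance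

-- ===== CLAIM (what is proved, stated in full; the proofs are below) =====
def Claim_equal_fuzzy_match : Prop := ∀ (query : String) (text : String), Dom_fuzzy_match query text → Spec_fuzzy_match query text (fuzzy_match query text)

-- ===== LEMMAS AND PROOFS =====

-- reference form of lower_text.find(c, s) on a single char: first index i ≥ s with lt[i] = c, else -1
def firstIdx (lt : List Char) (c : Char) (s : Nat) : Int :=
  if h : s < lt.length then
    (if lt[s] = c then (s : Int) else firstIdx lt c (s + 1))
  else -1
termination_by lt.length - s

-- the greedy match positions, stopping at the first failed find
def pvGreedy (lt : List Char) : List Char → Nat → List Nat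
  | [], _ => []
  | c :: qs, s =>
    let f := firstIdx lt c s
    if f = -1 then [] else f.toNat :: pvGreedy lt qs (f.toNat + 1)

-- the score A's scan accumulates along a chain of match positions (prev = previous match, qi = query index)
def pvChainScore (lt : List Char) (prev qi : Int) : List Nat → Int
  | [] => 0
  | r :: rest =>
    (1 + (if pvIsWordBoundary lt (r : Int) then 5 else 0)
       + (if (r : Int) = prev + 1 then 3 else 0)
       + (if (r : Int) = qi then 2 else 0))
      + pvChainScore lt (r : Int) (qi + 1) rest

lemma single_prefix_drop (xs : List Char) (c : Char) (k : Nat) (hk : k < xs.length) :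
    ([c] <+: xs.drop k) ↔ xs[k] = c := by
  rw [List.drop_eq_getElem_cons hk, List.cons_prefix_cons]
  simp [eq_comm]

lemma firstIdx_neg_of (lt : List Char) (c : Char) (s : Nat)
    (h : ∀ i, s ≤ i → (hi : i < lt.length) → lt[i] ≠ c) : firstIdx lt c s = -1 := by
  rw [firstIdx]
  split_ifs with h1 h2
  · exact absurd h2 (h s le_rfl h1)
  · exact firstIdx_neg_of lt c (s+1) (fun i hi hlt => h i (by omega) hlt)
  · rfl
termination_by lt.length - s

lemma firstIdx_of_spec (lt : List Char) (c : Char) (s r : Nat) (hsr : s ≤ r) (hr : r < lt.length)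
    (hc : lt[r] = c) (hmin : ∀ i, s ≤ i → i < r → (hi : i < lt.length) → lt[i] ≠ c) :
    firstIdx lt c s = (r : Int) := by
  rw [firstIdx]
  rcases Nat.eq_or_lt_of_le hsr with rfl | hlt
  · simp [hr, hc]
  · have hs : s < lt.length := by omega
    have hne : lt[s] ≠ c := hmin s le_rfl hlt hs
    simp only [hs, dif_pos, hne]
    exact firstIdx_of_spec lt c (s+1) r (by omega) hr hc (fun i hi => hmin i (by omega))
termination_by lt.length - s

lemma firstIdx_spec (lt : List Char) (c : Char) (s : Nat) (h : firstIdx lt c s ≠ -1) :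
    ∃ r : Nat, firstIdx lt c s = (r : Int) ∧ s ≤ r ∧ r < lt.length ∧
      (∀ hr : r < lt.length, lt[r] = c) ∧
      (∀ i, s ≤ i → i < r → (hi : i < lt.length) → lt[i] ≠ c) := by
  rw [firstIdx] at h ⊢
  split_ifs at h ⊢ with h1 h2
  · exact ⟨s, rfl, le_rfl, h1, fun _ => h2, fun i h1 h2 _ => by omega⟩
  · obtain ⟨r, hr1, hr2, hr3, hr4, hr5⟩ := firstIdx_spec lt c (s+1) h
    exact ⟨r, hr1, by omega, hr3, hr4, fun i hi hir hlt => by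
      rcases Nat.eq_or_lt_of_le hi with rfl | hi'
      · exact h2
      · exact hr5 i hi' hir hlt⟩
  · exact absurd rfl h
termination_by lt.length - s

lemma mem_drop_of_getElem (lt : List Char) (c : Char) (s i : Nat) (hi : s ≤ i)
    (hlt : i < lt.length) (hc : lt[i] = c) : c ∈ lt.drop s := by
  have h : (lt.drop s)[i - s]'(by simp; omega) = c := by
    rw [List.getElem_drop]
    simp only [show s + (i - s) = i by omega]
    exact hc
  exact h ▸ List.getElem_mem _

lemma findFrom_eq_firstIdx (lt : List Char) (c : Char) (s : Nat) (hs : s ≤ lt.length) :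
    PySem.Chars.findFrom lt [c] (s : Int) = firstIdx lt c s := by
  by_cases h : PySem.Chars.findFrom lt [c] (s : Int) = -1
  · rw [h]
    rw [PySem.Chars.findFrom_natCast_eq_neg_one_iff lt [c] s hs] at h
    refine (firstIdx_neg_of lt c s (fun i hi hlt hc => h ?_)).symm
    obtain ⟨u, v, huv⟩ := List.append_of_mem (mem_drop_of_getElem lt c s i hi hlt hc)
    exact ⟨u, v, by rw [huv]; simp⟩
  · obtain ⟨h1, h2, h3⟩ := PySem.Chars.findFrom_natCast_spec lt [c] s hs h
    have h0 : 0 ≤ PySem.Chars.findFrom lt [c] (s : Int) := le_trans (by positivity) h1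
    set r : Nat := (PySem.Chars.findFrom lt [c] (s : Int)).toNat with hr
    have hfr : PySem.Chars.findFrom lt [c] (s : Int) = (r : Int) := by omega
    have hrn : r < lt.length := by
      by_contra hge
      rw [List.drop_eq_nil_of_le (by omega)] at h2
      simp at h2
    rw [hfr]
    refine (firstIdx_of_spec lt c s r (by omega) hrn ((single_prefix_drop lt c r hrn).mp h2)
      (fun i hi hir hlt hc => h3 i hi (by omega) ((single_prefix_drop lt c i hlt).mpr hc))).symm

lemma rejectA_eq (lt : List Char) (qs : List Char) (s : Nat) (hs : s ≤ lt.length) :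
    pvRejectA lt qs (s : Int) = decide ((pvGreedy lt qs s).length = qs.length) := by
  induction qs generalizing s with
  | nil => simp [pvRejectA, pvGreedy]
  | cons ch rest ih =>
    simp only [pvRejectA, pvGreedy]
    rw [findFrom_eq_firstIdx lt ch s hs]
    by_cases h : firstIdx lt ch s = -1
    · simp [h]
    · obtain ⟨r, hr1, hr2, hr3, _, _⟩ := firstIdx_spec lt ch s h
      have hne : (r : Int) ≠ -1 := by omega
      have hcast : (r : Int) + 1 = ((r + 1 : Nat) : Int) := by push_cast; ring
      simp only [hr1, if_neg hne, Int.toNat_natCast, List.length_cons, hcast,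
        ih (r + 1) (by omega)]
      simp only [decide_eq_decide]
      omega

lemma findPositionsB_eq (lt : List Char) (qs : List Char) (s : Nat) (acc : List Int)
    (hs : s ≤ lt.length) :
    pvFindPositionsB lt qs (s : Int) acc =
      if (pvGreedy lt qs s).length = qs.length
      then some (acc ++ (pvGreedy lt qs s).map Int.ofNat) else none := by
  induction qs generalizing s acc with
  | nil => simp [pvFindPositionsB, pvGreedy]
  | cons ch rest ih =>
    simp only [pvFindPositionsB, pvGreedy]
    rw [findFrom_eq_firstIdx lt ch s hs]
    by_cases h : firstIdx lt ch s = -1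
    · simp [h]
    · obtain ⟨r, hr1, hr2, hr3, _, _⟩ := firstIdx_spec lt ch s h
      have hne : (r : Int) ≠ -1 := by omega
      have hcast : (r : Int) + 1 = ((r + 1 : Nat) : Int) := by push_cast; ring
      simp only [hr1, if_neg hne, Int.toNat_natCast, List.length_cons, hcast,
        ih (r + 1) (acc ++ [(r : Int)]) (by omega)]
      by_cases hfull : (pvGreedy lt rest (r + 1)).length = rest.length
      · simp [hfull]
      · simp [hfull]

lemma greedy_of_ge (lt : List Char) (qs : List Char) (s : Nat) (hs : lt.length ≤ s) :
    pvGreedy lt qs s = [] := by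
  cases qs with
  | nil => rfl
  | cons c rest =>
    have h : firstIdx lt c s = -1 := by rw [firstIdx]; rw [dif_neg (by omega)]
    simp [pvGreedy, h]

lemma scan_eq (lt lq : List Char) (m : Nat) : ∀ (k s : Nat) (ps : List Int) (sc prev : Int),
    s + m = lt.length → k ≤ lq.length →
    (PySem.List.pyRange (s : Int) (lt.length : Int)).foldl (pvScanStep lt lq) (ps, sc, (k : Int), prev) =
      (ps ++ (pvGreedy lt (lq.drop k) s).map Int.ofNat,
       sc + pvChainScore lt prev (k : Int) (pvGreedy lt (lq.drop k) s),
       ((k + (pvGreedy lt (lq.drop k) s).length : Nat) : Int),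
       ((pvGreedy lt (lq.drop k) s).map Int.ofNat).getLastD prev) := by
  induction m with
  | zero =>
    intro k s ps sc prev hsm hk
    have hs : s = lt.length := by omega
    subst hs
    rw [greedy_of_ge lt _ lt.length le_rfl]
    simp [pvChainScore]
  | succ m ih =>
    intro k s ps sc prev hsm hk
    have hslen : s < lt.length := by omega
    have hlts : PySem.List.pyGetD lt (s : Int) 'a' = lt[s] := by
      rw [PySem.List.pyGetD_natCast]; exact List.getD_eq_getElem _ _ hslen
    rw [PySem.List.pyRange_one_cons (by exact_mod_cast hslen), List.foldl_cons,
        show (s : Int) + 1 = ((s + 1 : Nat) : Int) by push_cast; ring]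
    by_cases hk' : k < lq.length
    · have hlqk : PySem.List.pyGetD lq (k : Int) 'a' = lq[k] := by
        rw [PySem.List.pyGetD_natCast]; exact List.getD_eq_getElem _ _ hk'
      have hdrop : lq.drop k = lq[k] :: lq.drop (k + 1) := List.drop_eq_getElem_cons hk'
      by_cases hc : lt[s] = lq[k]
      · have hcond : ((k : Int) < (lq.length : Int) ∧
            PySem.List.pyGetD lt (s : Int) 'a' = PySem.List.pyGetD lq (k : Int) 'a') := by
          constructor
          · exact_mod_cast hk'
          · rw [hlts, hlqk, hc]
        have hfi : firstIdx lt (lq[k]) s = (s : Int) := by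
          rw [firstIdx]; rw [dif_pos hslen, if_pos hc]
        have hg : pvGreedy lt (lq.drop k) s = s :: pvGreedy lt (lq.drop (k + 1)) (s + 1) := by
          rw [hdrop]
          simp [pvGreedy, hfi]
        simp only [pvScanStep, if_pos hcond]
        rw [show (k : Int) + 1 = ((k + 1 : Nat) : Int) by push_cast; ring,
            ih (k + 1) (s + 1) _ _ _ (by omega) (by omega)]
        rw [hg]
        simp only [Prod.mk.injEq, List.map_cons, List.length_cons, List.getLastD_cons]
        refine ⟨?_, ?_, ?_, ?_⟩
        · simp
        · simp only [pvChainScore]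
          push_cast
          split_ifs <;> ring
        · push_cast
          ring
        · cases h : pvGreedy lt (List.drop (k + 1) lq) (s + 1) with
          | nil => rfl
          | cons b bs =>
            simp only [List.map_cons, List.getLastD_cons]
      · have hcond : ¬ ((k : Int) < (lq.length : Int) ∧
            PySem.List.pyGetD lt (s : Int) 'a' = PySem.List.pyGetD lq (k : Int) 'a') := by
          rw [hlts, hlqk]; exact fun h => hc h.2
        have hfi : firstIdx lt (lq[k]) s = firstIdx lt (lq[k]) (s + 1) := by
          rw [firstIdx]; rw [dif_pos hslen, if_neg hc]
        have hg : pvGreedy lt (lq.drop k) s = pvGreedy lt (lq.drop k) (s + 1) := by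
          rw [hdrop]
          simp only [pvGreedy, hfi]
        simp only [pvScanStep, if_neg hcond]
        rw [ih k (s + 1) ps sc prev (by omega) hk, hg]
    · have hke : k = lq.length := by omega
      have hcond : ¬ ((k : Int) < (lq.length : Int) ∧
          PySem.List.pyGetD lt (s : Int) 'a' = PySem.List.pyGetD lq (k : Int) 'a') := by
        intro h
        have := h.1
        omega
      have hg : lq.drop k = [] := by rw [hke]; simp
      simp only [pvScanStep, if_neg hcond]
      rw [ih k (s + 1) ps sc prev (by omega) hk]
      rw [hg]
      simp [pvGreedy, pvChainScore]

lemma score_eq (lt : List Char) (P : List Int) :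
    ∀ (rest : List Nat) (k : Nat) (prev sc : Int),
    P.drop k = rest.map Int.ofNat →
    (0 < k → PySem.List.pyGetD P ((k : Int) - 1) 0 = prev) →
    (k = 0 → prev = -2) →
    (PySem.List.enumerate (rest.map Int.ofNat) (k : Int)).foldl (pvScoreStep lt P) sc =
      sc + pvChainScore lt prev (k : Int) rest := by
  intro rest
  induction rest with
  | nil => intro k prev sc _ _ _; simp [pvChainScore]
  | cons r rest ih =>
    intro k prev sc hd hprev hzero
    have hkP : k < P.length := by
      by_contra hge
      rw [List.drop_eq_nil_of_le (by omega)] at hd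
      simp at hd
    have hPk : PySem.List.pyGetD P (k : Int) 0 = Int.ofNat r := by
      rw [PySem.List.pyGetD_natCast, List.getD_eq_getElem _ _ hkP]
      have h0 : (P.drop k)[0]'(by rw [hd]; simp) = P[k] := by
        rw [List.getElem_drop]; simp
      rw [← h0]
      simp [hd]
    have hd' : P.drop (k + 1) = rest.map Int.ofNat := by
      have : P.drop (k + 1) = (P.drop k).drop 1 := by rw [List.drop_drop]
      rw [this, hd]
      simp
    have hiff : (0 < (k : Int) ∧ Int.ofNat r = PySem.List.pyGetD P ((k : Int) - 1) 0 + 1)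
        ↔ (Int.ofNat r : Int) = prev + 1 := by
      rcases Nat.eq_zero_or_pos k with rfl | hpos
      · rw [hzero rfl]
        simp only [Int.ofNat_eq_natCast]
        constructor
        · rintro ⟨h, -⟩; omega
        · intro h; omega
      · rw [hprev hpos]
        constructor
        · rintro ⟨-, h⟩; exact h
        · intro h; exact ⟨by exact_mod_cast hpos, h⟩
    rw [List.map_cons, PySem.List.enumerate_cons, List.foldl_cons,
        show (k : Int) + 1 = ((k + 1 : Nat) : Int) by push_cast; ring]
    have hstep : pvScoreStep lt P sc ((k : Int), Int.ofNat r) =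
        sc + (1 + (if pvIsWordBoundary lt (Int.ofNat r) then 5 else 0)
            + (if (Int.ofNat r : Int) = prev + 1 then 3 else 0)
            + (if (Int.ofNat r : Int) = (k : Int) then 2 else 0)) := by
      simp only [pvScoreStep, hiff]
      split_ifs <;> ring
    rw [hstep, ih (k + 1) (Int.ofNat r) _ hd'
        (fun _ => by
          rw [show ((k + 1 : Nat) : Int) - 1 = (k : Int) by push_cast; ring]
          exact hPk)
        (by omega)]
    simp only [pvChainScore, Int.ofNat_eq_natCast,
      show ((k + 1 : Nat) : Int) = (k : Int) + 1 by push_cast; ring]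
    ring

theorem fuzzy_match_eq_alt (query text : String) :
    fuzzy_match query text = fuzzy_match_alt query text := by
  by_cases hq : query = ""
  · simp [fuzzy_match, fuzzy_match_alt, hq]
  · simp only [fuzzy_match, fuzzy_match_alt, if_neg hq]
    set lq := PySem.Chars.lower query.toList with hlq
    set lt := PySem.Chars.lower text.toList with hlt
    have hr : pvRejectA lt lq 0 = decide ((pvGreedy lt lq 0).length = lq.length) := by
      have h := rejectA_eq lt lq 0 (by omega)
      rwa [Nat.cast_zero] at h
    have hf : pvFindPositionsB lt lq 0 [] =
        (if (pvGreedy lt lq 0).length = lq.length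
         then some ([] ++ (pvGreedy lt lq 0).map Int.ofNat) else none) := by
      have h := findPositionsB_eq lt lq 0 [] (by omega)
      rwa [Nat.cast_zero] at h
    by_cases hfull : (pvGreedy lt lq 0).length = lq.length
    · rw [hr, hf]
      have hs := scan_eq lt lq lt.length 0 0 [] 0 (-2) (by omega) (by omega)
      rw [Nat.cast_zero, List.drop_zero] at hs
      rw [if_pos hfull, hs]
      simp only [hfull, List.nil_append, Nat.zero_add]
      have hsc := score_eq lt ((pvGreedy lt lq 0).map Int.ofNat) (pvGreedy lt lq 0) 0 (-2) 0
        (by rw [List.drop_zero]) (by omega) (fun _ => rfl)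
      rw [Nat.cast_zero] at hsc
      simp only [hsc]
      have hqi : ¬ ((lq.length : Int) < (lq.length : Int)) := by omega
      simp only [decide_true, Bool.true_eq_false, if_false, hqi, if_false,
        List.length_map, hfull, zero_add]
    · rw [hr, hf]
      simp [hfull]

-- ===== VERDICT (by name: the statement is the Claim_ definition above) =====
theorem fuzzy_match_spec : Claim_equal_fuzzy_match := by
  intro query text _
  exact fuzzy_match_eq_alt query text
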